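-- pv_equiv track=rewrite | github.com/G1ART/GenAIProacTrade | src/tests/test_agh_v1_patch6_copy_no_leak.py | _strip_template_exprs
-- ===== SOURCE A (Python) =====
-- def _strip_template_exprs(text: str) -> str:
--     """Remove ``${...}`` expressions with brace-matched balancing.
--
--     Template-literal expressions contain JS code, not displayed copy; only
--     the surrounding static text is user-visible. ``[^}]*`` is not enough
--     because nested braces in arrow-function bodies would terminate early.
--     """
--     out: list[str] = []
--     i = 0
--     n = len(text)
--     while i < n:
--         if i + 1 < n and text[i] == "$" and text[i + 1] == "{":
--             depth = 1
--             j = i + 2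
--             while j < n and depth > 0:
--                 if text[j] == "{":
--                     depth += 1
--                 elif text[j] == "}":
--                     depth -= 1
--                 j += 1
--             out.append(" ")
--             i = j
--             continue
--         out.append(text[i])
--         i += 1
--     return "".join(out)
-- ===== SOURCE B (Python) =====
-- def _strip_template_exprs(text: str) -> str:
--     """Remove ${...} expressions, jumping between markers with str.find."""
--     pieces = []
--     i = 0
--     n = len(text)
--     while i < n:
--         idx = text.find("${", i)
--         if idx == -1:
--             pieces.append(text[i:])
--             break
--         pieces.append(text[i:idx])
--         depth = 1
--         j = idx + 2
--         while j < n and depth > 0: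
--             if text[j] == "{":
--                 depth += 1
--             elif text[j] == "}":
--                 depth -= 1
--             j += 1
--         pieces.append(" ")
--         i = j
--     return "".join(pieces)
-- ===== Notes on version B (the rewrite author's own statement) =====
-- stated objective: alternative
-- what changed: The outer character-by-character scan is replaced by str.find jumps between template markers, emitting each static stretch as a whole slice and joining the collected pieces; the brace-balancing inner loop is kept.
import Mathlib
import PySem

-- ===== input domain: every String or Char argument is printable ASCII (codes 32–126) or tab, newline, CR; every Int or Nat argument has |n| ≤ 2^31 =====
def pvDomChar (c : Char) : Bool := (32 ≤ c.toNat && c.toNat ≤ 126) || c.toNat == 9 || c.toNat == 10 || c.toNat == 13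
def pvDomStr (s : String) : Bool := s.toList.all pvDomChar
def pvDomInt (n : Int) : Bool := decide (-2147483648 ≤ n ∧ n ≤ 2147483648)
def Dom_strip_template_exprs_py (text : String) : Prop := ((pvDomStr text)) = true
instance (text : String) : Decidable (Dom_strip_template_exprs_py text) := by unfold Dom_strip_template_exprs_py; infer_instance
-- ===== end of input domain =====

-- B replaces A's character-by-character outer scan by find-jumps between '${' markers,
-- emitting whole static slices (objective: alternative decomposition; same inner depth loop).

-- ===== PORT A =====
-- inner brace-balancing loop of A (and of B, which keeps it verbatim):
-- consumes characters while depth > 0, returning the remainder after the matching '}'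
def pvSkipBal : Nat → List Char → List Char
  | _, [] => []
  | 0, l => l
  | d+1, c :: rest =>
      pvSkipBal (if c = '{' then d + 2 else if c = '}' then d else d + 1) rest

theorem pvSkipBal_length : ∀ (d : Nat) (l : List Char), (pvSkipBal d l).length ≤ l.length := by
  intro d l
  induction l generalizing d with
  | nil => cases d <;> simp [pvSkipBal]
  | cons c rest ih =>
    cases d with
    | zero => simp [pvSkipBal]
    | succ d =>
      simp only [pvSkipBal, List.length_cons]
      exact Nat.le_trans (ih _) (Nat.le_succ _)

-- A's outer loop: character by character
def pvStripA : List Char → List Char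
  | [] => []
  | c :: rest =>
    if c = '$' ∧ rest.head? = some '{' then
      ' ' :: pvStripA (pvSkipBal 1 rest.tail)
    else
      c :: pvStripA rest
termination_by l => l.length
decreasing_by
  · have h1 := pvSkipBal_length 1 rest.tail
    have h2 : rest.tail.length ≤ rest.length := by cases rest <;> simp
    simp only [List.length_cons]; omega
  · simp

def strip_template_exprs_py (text : String) : String :=
  String.ofList (pvStripA text.toList)

-- ===== PORT B =====
-- text.find("${", i): scan for the first '${'; returns (static prefix, remainder after the marker)
def pvFindTpl : List Char → Option (List Char × List Char)
  | [] => none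
  | c :: rest =>
    if c = '$' ∧ rest.head? = some '{' then some ([], rest.tail)
    else (pvFindTpl rest).map fun pr => (c :: pr.1, pr.2)

theorem pvFindTpl_length : ∀ (l p r : List Char),
    pvFindTpl l = some (p, r) → p.length + 2 + r.length = l.length := by
  intro l
  induction l with
  | nil => intro p r h; simp [pvFindTpl] at h
  | cons c rest ih =>
    intro p r h
    simp only [pvFindTpl] at h
    split at h
    · rename_i hc
      simp at h
      obtain ⟨h1, h2⟩ := h
      subst h1; subst h2
      cases rest with
      | nil => simp at hc
      | cons d rest' => simp; omega
    · cases hf : pvFindTpl rest with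
      | none => simp [hf] at h
      | some pr =>
        simp [hf] at h
        obtain ⟨h1, h2⟩ := h
        have := ih pr.1 pr.2 (by rw [hf])
        subst h1; subst h2
        simp only [List.length_cons]
        omega

-- B's outer loop: jump from marker to marker, emit static slices whole
def pvStripB (l : List Char) : List Char :=
  match h : pvFindTpl l with
  | none => l
  | some (p, r) => p ++ ' ' :: pvStripB (pvSkipBal 1 r)
termination_by l.length
decreasing_by
  have h1 := pvFindTpl_length l p r h
  have h2 := pvSkipBal_length 1 r
  omega

def strip_template_exprs_py_alt (text : String) : String :=
  String.ofList (pvStripB text.toList)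

-- ===== PRECONDITION & SPEC =====
def Spec_strip_template_exprs_py (text : String) (out : String) : Prop := out = strip_template_exprs_py_alt text
instance (text : String) (out : String) : Decidable (Spec_strip_template_exprs_py text out) := by unfold Spec_strip_template_exprs_py; infer_instance

-- ===== CLAIM (what is proved, stated in full; the proofs are below) =====
def Claim_equal_strip_template_exprs_py : Prop := ∀ (text : String), Dom_strip_template_exprs_py text → Spec_strip_template_exprs_py text (strip_template_exprs_py text)

-- ===== LEMMAS AND PROOFS =====

theorem pvStripA_of_find_none (l : List Char) (h : pvFindTpl l = none) :
    pvStripA l = l := by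
  induction l with
  | nil => simp [pvStripA]
  | cons c rest ih =>
    simp only [pvFindTpl] at h
    split at h
    · exact absurd h (by simp)
    · rename_i hc
      cases hf : pvFindTpl rest with
      | none => simp [pvStripA, hc, ih hf]
      | some pr => simp [hf] at h

theorem pvStripA_of_find_some : ∀ (l p r : List Char),
    pvFindTpl l = some (p, r) →
    pvStripA l = p ++ ' ' :: pvStripA (pvSkipBal 1 r) := by
  intro l
  induction l with
  | nil => intro p r h; simp [pvFindTpl] at h
  | cons c rest ih =>
    intro p r h
    simp only [pvFindTpl] at h
    split at h
    · rename_i hc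
      simp at h
      obtain ⟨h1, h2⟩ := h
      subst h1; subst h2
      simp [pvStripA, hc]
    · rename_i hc
      cases hf : pvFindTpl rest with
      | none => simp [hf] at h
      | some pr =>
        simp [hf] at h
        obtain ⟨h1, h2⟩ := h
        subst h1; subst h2
        simp [pvStripA, hc, ih pr.1 pr.2 (by rw [hf])]

theorem pvStripB_none (l : List Char) (h : pvFindTpl l = none) : pvStripB l = l := by
  rw [pvStripB]; split <;> simp_all

theorem pvStripB_some (l p r : List Char) (h : pvFindTpl l = some (p, r)) :
    pvStripB l = p ++ ' ' :: pvStripB (pvSkipBal 1 r) := by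
  rw [pvStripB]; split <;> simp_all

theorem pvStripA_eq_pvStripB : ∀ (n : Nat) (l : List Char), l.length ≤ n →
    pvStripA l = pvStripB l := by
  intro n
  induction n with
  | zero =>
    intro l hl
    have : l = [] := List.eq_nil_of_length_eq_zero (Nat.le_zero.mp hl)
    subst this
    simp [pvStripA, pvStripB, pvFindTpl]
  | succ m ih =>
    intro l hl
    cases hf : pvFindTpl l with
    | none =>
      rw [pvStripA_of_find_none l hf, pvStripB_none l hf]
    | some pr =>
      obtain ⟨p, r⟩ := pr
      rw [pvStripA_of_find_some l p r hf, pvStripB_some l p r hf]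
      have hlen := pvFindTpl_length l p r hf
      have hskip := pvSkipBal_length 1 r
      rw [ih (pvSkipBal 1 r) (by omega)]

-- ===== VERDICT (by name: the statement is the Claim_ definition above) =====
theorem strip_template_exprs_py_spec : Claim_equal_strip_template_exprs_py := by
  intro text _
  unfold Spec_strip_template_exprs_py strip_template_exprs_py strip_template_exprs_py_alt
  rw [pvStripA_eq_pvStripB text.toList.length text.toList (Nat.le_refl _)]
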